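-- pv_equiv track=rewrite | github.com/JuBra/GEMEditor | GEMEditor/connect/kegg.py | parse_kegg_compound_info
-- ===== SOURCE A (Python) =====
-- from collections import defaultdict
--
-- def parse_kegg_compound_info(data):
--     """ Parse the information from the KEGG api
--
--     Parameters
--     ----------
--     data : str
--
--     Returns
--     -------
--
--     """
--     formula = None
--     names = []
--     db_links = defaultdict(list)
--
--     current_step = None
--     current_db = None
--
--     for line in data.split("\n"):
--         split_line = line.split(" ")
--         if split_line[0] != "":
--             current_step = split_line[0]
--
--         if current_step == "FORMULA":
--             formula = split_line[-1]
--         elif current_step == "NAME":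
--             names.append(" ".join(split_line[1:]).strip('" ;'))
--         elif current_step == "DBLINKS":
--             links = [x for x in split_line[1:] if x != ""]
--             if links[0].endswith(":"):
--                 current_db = links[0].strip(":").lower()
--                 db_links[current_db].extend(links[1:])
--             else:
--                 db_links[current_db].extend(links)
--
--     return formula, names, db_links
-- ===== SOURCE B (Python) =====
-- def parse_kegg_compound_info(data):
--     # Two-pass: group lines into ordered (header, rows) sections, then dispatch per section.
--     sections = []
--     for line in data.split("\n"):
--         split_line = line.split(" ")
--         if split_line[0] != "":
--             sections.append((split_line[0], [split_line]))
--         elif sections: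
--             sections[-1][1].append(split_line)
--         else:
--             sections.append((None, [split_line]))
--
--     formula = None
--     names = []
--     db_links = {}
--     current_db = None
--     for header, rows in sections:
--         if header == "FORMULA":
--             formula = rows[-1][-1]
--         elif header == "NAME":
--             for split_line in rows:
--                 names.append(" ".join(split_line[1:]).strip('" ;'))
--         elif header == "DBLINKS":
--             for split_line in rows:
--                 links = [x for x in split_line[1:] if x != ""]
--                 if links[0].endswith(":"):
--                     current_db = links[0].strip(":").lower()
--                     db_links.setdefault(current_db, []).extend(links[1:])
--                 else:
--                     db_links.setdefault(current_db, []).extend(links)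
--     return formula, names, db_links
-- ===== Notes on version B (the rewrite author's own statement) =====
-- stated objective: alternative
-- what changed: A is a single line loop threading a current_step state across every line; B first groups the lines into an ordered list of (header, rows) sections and then dispatches each section kind (FORMULA by its last row, NAME and DBLINKS by per-section folds) in a second pass.
-- outside the precondition, e.g. on parse_kegg_compound_info('DBLINKS abc'): A returns (None, [], {None: ['abc']}), B returns (None, [], {None: ['abc']})
import Mathlib
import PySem

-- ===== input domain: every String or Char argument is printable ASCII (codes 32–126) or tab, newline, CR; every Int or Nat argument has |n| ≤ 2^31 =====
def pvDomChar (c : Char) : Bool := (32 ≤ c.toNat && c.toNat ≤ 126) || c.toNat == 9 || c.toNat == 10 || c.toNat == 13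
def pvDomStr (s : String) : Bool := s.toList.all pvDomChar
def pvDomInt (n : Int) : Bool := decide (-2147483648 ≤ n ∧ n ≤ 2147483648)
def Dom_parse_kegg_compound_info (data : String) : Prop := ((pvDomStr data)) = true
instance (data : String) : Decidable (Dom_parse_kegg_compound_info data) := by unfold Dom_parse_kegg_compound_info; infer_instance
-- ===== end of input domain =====

-- B replaces A's single stateful line loop by a two-pass decomposition (group lines into ordered
-- sections first, then dispatch per section); objective: alternative structure, same cost.

-- ===== PORT A =====
-- state: (formula, names, db_links, current_step, current_db)
def pvAStep (st : Option String × List String × PySem.Dict String (List String) × Option String × Option String)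
    (line : String) : Option String × List String × PySem.Dict String (List String) × Option String × Option String :=
  let split_line := (PySem.Str.split? line " ").getD []   -- line.split(" "); separator ≠ "" so split? = some, exact
  match st with
  | (formula, names, db_links, current_step, current_db) =>
    -- split_line[0]: a Python split result is never empty, so headD is exact
    let current_step := if split_line.headD "" ≠ "" then some (split_line.headD "") else current_step
    if current_step = some "FORMULA" then
      -- split_line[-1]: list nonempty, getLastD exact
      (some (split_line.getLastD ""), names, db_links, current_step, current_db)
    else if current_step = some "NAME" then
      -- split_line[1:] = drop 1 (nonnegative slice start), exact
      (formula, names ++ [PySem.Str.stripChars (PySem.Str.join " " (split_line.drop 1)) "\" ;"],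
       db_links, current_step, current_db)
    else if current_step = some "DBLINKS" then
      let links := (split_line.drop 1).filter (fun x => x ≠ "")
      match links with
      | [] => (formula, names, db_links, current_step, current_db)   -- Python raises IndexError (links[0]); outside Pre_
      | l0 :: rest =>
        if PySem.Str.endswith l0 ":" then
          let db := PySem.Str.lower (PySem.Str.stripChars l0 ":")
          -- defaultdict(list): db_links[db].extend(rest) = modify with default []
          (formula, names, db_links.modify db [] (· ++ rest), current_step, some db)
        else
          match current_db with
          | none => (formula, names, db_links, current_step, current_db)   -- Python uses dict key None (not a String); outside Pre_
          | some db => (formula, names, db_links.modify db [] (· ++ links), current_step, current_db)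
    else (formula, names, db_links, current_step, current_db)

def parse_kegg_compound_info (data : String) : Option String × List String × (List (String × List String)) :=
  let lines := (PySem.Str.split? data "\n").getD []   -- data.split("\n")
  match lines.foldl pvAStep (none, [], PySem.Dict.empty, none, none) with
  | (formula, names, db_links, _, _) => (formula, names, db_links.items)

-- ===== PORT B =====
-- pass 1: group lines into ordered sections (header, parsed rows)
def pvBGroup (secs : List (Option String × List (List String))) (line : String) :
    List (Option String × List (List String)) :=
  let split_line := (PySem.Str.split? line " ").getD []
  if split_line.headD "" ≠ "" then secs ++ [(some (split_line.headD ""), [split_line])]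
  else
    match secs.getLast? with
    | some last => secs.dropLast ++ [(last.1, last.2 ++ [split_line])]   -- sections[-1][1].append(split_line)
    | none => secs ++ [(none, [split_line])]

def pvBName (names : List String) (split_line : List String) : List String :=
  names ++ [PySem.Str.stripChars (PySem.Str.join " " (split_line.drop 1)) "\" ;"]

def pvBDb (st : PySem.Dict String (List String) × Option String) (split_line : List String) :
    PySem.Dict String (List String) × Option String :=
  let links := (split_line.drop 1).filter (fun x => x ≠ "")
  match links with
  | [] => st   -- Python raises IndexError; outside Pre_
  | l0 :: rest =>
    if PySem.Str.endswith l0 ":" then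
      let db := PySem.Str.lower (PySem.Str.stripChars l0 ":")
      ((st.1.setdefault db []).modify db [] (· ++ rest), some db)   -- setdefault(db, []).extend(rest)
    else
      match st.2 with
      | none => st   -- Python uses dict key None; outside Pre_
      | some db => ((st.1.setdefault db []).modify db [] (· ++ links), st.2)

-- pass 2: dispatch one section; state (formula, names, db_links, current_db)
def pvBSection (st : Option String × List String × PySem.Dict String (List String) × Option String)
    (sec : Option String × List (List String)) :
    Option String × List String × PySem.Dict String (List String) × Option String :=
  match st with
  | (formula, names, db_links, current_db) =>
    if sec.1 = some "FORMULA" then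
      (some ((sec.2.getLastD []).getLastD ""), names, db_links, current_db)   -- rows[-1][-1]; rows nonempty
    else if sec.1 = some "NAME" then
      (formula, sec.2.foldl pvBName names, db_links, current_db)
    else if sec.1 = some "DBLINKS" then
      let r := sec.2.foldl pvBDb (db_links, current_db)
      (formula, names, r.1, r.2)
    else (formula, names, db_links, current_db)

def parse_kegg_compound_info_alt (data : String) : Option String × List String × (List (String × List String)) :=
  let lines := (PySem.Str.split? data "\n").getD []
  let sections := lines.foldl pvBGroup []
  match sections.foldl pvBSection (none, [], PySem.Dict.empty, none) with
  | (formula, names, db_links, _) => (formula, names, db_links.items)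

-- ===== PRECONDITION & SPEC =====
-- first token of a line
def pvTok (line : String) : String := ((PySem.Str.split? line " ").getD []).headD ""
-- header of the section line i belongs to: first token of the nearest line ≤ i that has one
def pvHdrAt (lines : List String) (i : Nat) : Option String :=
  ((lines.take (i + 1)).reverse.find? (fun l => pvTok l ≠ "")).map pvTok
-- the non-empty tokens after the first one
def pvLinks (line : String) : List String :=
  ((((PySem.Str.split? line " ").getD [])).drop 1).filter (fun x => x ≠ "")

-- Pre_ excludes exactly the inputs where Python A does not return a String-keyed result: a line in a
-- DBLINKS section whose link list is empty (A raises IndexError on links[0]), or a DBLINKS line with no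
-- colon-terminated first link at or before it (A then keys the dict by None, which is not a String).
def Pre_parse_kegg_compound_info (data : String) : Prop :=
  ∀ i < ((PySem.Str.split? data "\n").getD []).length,
    pvHdrAt ((PySem.Str.split? data "\n").getD []) i = some "DBLINKS" →
      pvLinks (((PySem.Str.split? data "\n").getD []).getD i "") ≠ [] ∧
      ∃ j ≤ i, pvHdrAt ((PySem.Str.split? data "\n").getD []) j = some "DBLINKS" ∧
        PySem.Str.endswith ((pvLinks (((PySem.Str.split? data "\n").getD []).getD j "")).headD "") ":" = true
instance (data : String) : Decidable (Pre_parse_kegg_compound_info data) := by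
  unfold Pre_parse_kegg_compound_info; infer_instance

def pvWitness_parse_kegg_compound_info : String :=
  "NAME Glc\nFORMULA C6H12O6\nDBLINKS CAS: 50-99-7"

def Spec_parse_kegg_compound_info (data : String) (out : Option String × List String × (List (String × List String))) : Prop := out = parse_kegg_compound_info_alt data
instance (data : String) (out : Option String × List String × (List (String × List String))) : Decidable (Spec_parse_kegg_compound_info data out) := by unfold Spec_parse_kegg_compound_info; infer_instance

-- ===== CLAIM (what is proved, stated in full; the proofs are below) =====
def Claim_equal_parse_kegg_compound_info : Prop := ∀ (data : String), Dom_parse_kegg_compound_info data → Pre_parse_kegg_compound_info data → Spec_parse_kegg_compound_info data (parse_kegg_compound_info data)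

-- ===== LEMMAS AND PROOFS =====

-- the per-line effect shared by both programs, given the section header of the line
def pvLine (h : Option String) (st : Option String × List String × PySem.Dict String (List String) × Option String)
    (split_line : List String) : Option String × List String × PySem.Dict String (List String) × Option String :=
  match st with
  | (formula, names, db_links, current_db) =>
    if h = some "FORMULA" then
      (some (split_line.getLastD ""), names, db_links, current_db)
    else if h = some "NAME" then
      (formula, pvBName names split_line, db_links, current_db)
    else if h = some "DBLINKS" then
      let links := (split_line.drop 1).filter (fun x => x ≠ "")
      match links with
      | [] => (formula, names, db_links, current_db)
      | l0 :: rest =>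
        if PySem.Str.endswith l0 ":" then
          let db := PySem.Str.lower (PySem.Str.stripChars l0 ":")
          (formula, names, db_links.modify db [] (· ++ rest), some db)
        else
          match current_db with
          | none => (formula, names, db_links, current_db)
          | some db => (formula, names, db_links.modify db [] (· ++ links), current_db)
    else (formula, names, db_links, current_db)

theorem pv_setdefault_modify (d : PySem.Dict String (List String)) (k : String)
    (f : List String → List String) : (d.setdefault k []).modify k [] f = d.modify k [] f := by
  by_cases h : d.contains k
  · rw [PySem.Dict.setdefault_of_contains d [] h]
  · have hget : d.get? k = none := (PySem.Dict.get?_eq_none_iff_contains d k).mpr (by simpa using h)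
    rw [PySem.Dict.setdefault_of_not_contains d [] (by simpa using h)]
    unfold PySem.Dict.modify
    rw [PySem.Dict.getD_insert, PySem.Dict.insert_insert_self]
    simp [PySem.Dict.getD, hget]

theorem pvLine_dblinks (f : Option String) (n : List String)
    (d : PySem.Dict String (List String)) (db : Option String) (sl : List String) :
    pvLine (some "DBLINKS") (f, n, d, db) sl = (f, n, (pvBDb (d, db) sl).1, (pvBDb (d, db) sl).2) := by
  unfold pvBDb pvLine
  cases hl : (sl.drop 1).filter (fun x => x ≠ "") with
  | nil => simp
  | cons l0 rest =>
    simp only [pv_setdefault_modify, Option.some.injEq, String.reduceEq, if_false]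
    split_ifs <;> first | rfl | (cases db <;> rfl)

theorem pvAStep_eq_line (f : Option String) (n : List String)
    (d : PySem.Dict String (List String)) (step db : Option String) (line : String) :
    pvAStep (f, n, d, step, db) line =
      (let sl := (PySem.Str.split? line " ").getD []
       let h := if sl.headD "" ≠ "" then some (sl.headD "") else step
       let w := pvLine h (f, n, d, db) sl
       (w.1, w.2.1, w.2.2.1, h, w.2.2.2)) := by
  unfold pvAStep pvLine pvBName
  dsimp only []
  repeat' split
  all_goals simp_all

theorem pvBSection_snoc (st : Option String × List String × PySem.Dict String (List String) × Option String)
    (h : Option String) (rows : List (List String)) (sl : List String) :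
    pvBSection st (h, rows ++ [sl]) = pvLine h (pvBSection st (h, rows)) sl := by
  obtain ⟨f, n, d, db⟩ := st
  unfold pvBSection
  by_cases h1 : h = some "FORMULA"
  · simp [h1, pvLine]
  · by_cases h2 : h = some "NAME"
    · simp [h2, pvLine, pvBName]
    · by_cases h3 : h = some "DBLINKS"
      · subst h3
        simp only [Option.some.injEq, String.reduceEq, if_false, if_true, List.foldl_concat]
        rw [pvLine_dblinks]
      · simp [h1, h2, h3, pvLine]

theorem pvBSection_singleton (st : Option String × List String × PySem.Dict String (List String) × Option String)
    (h : Option String) (sl : List String) :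
    pvBSection st (h, [sl]) = pvLine h st sl := by
  obtain ⟨f, n, d, db⟩ := st
  unfold pvBSection
  by_cases h1 : h = some "FORMULA"
  · simp [h1, pvLine]
  · by_cases h2 : h = some "NAME"
    · simp [h2, pvLine]
    · by_cases h3 : h = some "DBLINKS"
      · subst h3
        simp only [Option.some.injEq, String.reduceEq, if_false, if_true, List.foldl_cons,
          List.foldl_nil]
        rw [pvLine_dblinks]
      · simp [h1, h2, h3, pvLine]

-- header of the last section
def pvLastHdr (S : List (Option String × List (List String))) : Option String :=
  match S.getLast? with
  | none => none
  | some s => s.1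

theorem pvLine_none (st : Option String × List String × PySem.Dict String (List String) × Option String)
    (sl : List String) : pvLine none st sl = st := by
  obtain ⟨f, n, d, db⟩ := st
  simp [pvLine]

-- processing the grouped sections advances exactly like one more line of A
theorem pvBGroup_fold_step (init : Option String × List String × PySem.Dict String (List String) × Option String)
    (S : List (Option String × List (List String))) (l : String) :
    (pvBGroup S l).foldl pvBSection init =
        pvLine (if ((PySem.Str.split? l " ").getD []).headD "" ≠ ""
                then some (((PySem.Str.split? l " ").getD []).headD "") else pvLastHdr S)
          (S.foldl pvBSection init) ((PySem.Str.split? l " ").getD [])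
      ∧ pvLastHdr (pvBGroup S l) =
        (if ((PySem.Str.split? l " ").getD []).headD "" ≠ ""
         then some (((PySem.Str.split? l " ").getD []).headD "") else pvLastHdr S) := by
  unfold pvBGroup
  by_cases htok : ((PySem.Str.split? l " ").getD []).headD "" ≠ ""
  · simp only [if_pos htok]
    exact ⟨by rw [List.foldl_concat, pvBSection_singleton],
           by simp [pvLastHdr]⟩
  · simp only [if_neg htok]
    rcases List.eq_nil_or_concat S with rfl | ⟨ss, p, rfl⟩
    · simp [pvLastHdr, pvBSection_singleton, pvLine_none]
    · simp only [List.concat_eq_append, List.getLast?_concat, pvLastHdr, List.dropLast_concat]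
      exact ⟨by rw [List.foldl_concat, List.foldl_concat, pvBSection_snoc], trivial⟩

-- the invariant: A's fold state = B's two-pass state plus the last header
theorem pv_invariant (ls : List String) :
    ls.foldl pvAStep (none, [], PySem.Dict.empty, none, none) =
      (let S := ls.foldl pvBGroup []
       let w := S.foldl pvBSection (none, [], PySem.Dict.empty, none)
       (w.1, w.2.1, w.2.2.1, pvLastHdr S, w.2.2.2)) := by
  induction ls using List.reverseRecOn with
  | nil => rfl
  | append_singleton ls l ih =>
    simp only [List.foldl_concat]
    rw [ih, pvAStep_eq_line]
    obtain ⟨h1, h2⟩ := pvBGroup_fold_step (none, [], PySem.Dict.empty, none) (ls.foldl pvBGroup []) l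
    simp only [h1, h2]

-- ===== VERDICT (by name: the statement is the Claim_ definition above) =====
theorem parse_kegg_compound_info_spec : Claim_equal_parse_kegg_compound_info := by
  intro data _ _
  unfold Spec_parse_kegg_compound_info parse_kegg_compound_info parse_kegg_compound_info_alt
  simp only [pv_invariant ((PySem.Str.split? data "\n").getD [])]
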